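-- pv_equiv track=rewrite | github.com/18599125989-maker/RAG_Project | src/offline/chunking.py | split_markdown_blocks
-- ===== SOURCE A (Python) =====
-- from typing import List, Dict, Any
--
-- def split_markdown_blocks(md_text: str) -> List[str]:
--     """
--     先按 markdown 结构粗分：
--     - 标题单独成块
--     - 空行分段
--     - code block 尽量整体保留
--     """
--     lines = md_text.splitlines()
--     blocks = []
--
--     current_block = []
--     in_code_block = False
--
--     for line in lines:
--         stripped = line.strip()
--
--         if stripped.startswith("```"):
--             current_block.append(line)
--             in_code_block = not in_code_block
--             continue
--
--         if in_code_block: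
--             current_block.append(line)
--             continue
--
--         if stripped.startswith("#"):
--             if current_block:
--                 blocks.append("\n".join(current_block).strip())
--                 current_block = []
--             blocks.append(line.strip())
--             continue
--
--         if stripped == "":
--             if current_block:
--                 blocks.append("\n".join(current_block).strip())
--                 current_block = []
--         else:
--             current_block.append(line)
--
--     if current_block:
--         blocks.append("\n".join(current_block).strip())
--
--     return [b for b in blocks if b]
-- ===== SOURCE B (Python) =====
-- def split_markdown_blocks(md_text: str):
--     """Index-driven scan: a dedicated inner loop consumes a whole code block,
--     so no in_code_block flag is threaded through the main loop."""
--     lines = md_text.splitlines()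
--     blocks = []
--     current_block = []
--     i = 0
--     n = len(lines)
--     while i < n:
--         line = lines[i]
--         stripped = line.strip()
--         if stripped.startswith("```"):
--             current_block.append(line)
--             i += 1
--             while i < n:
--                 nxt = lines[i]
--                 current_block.append(nxt)
--                 i += 1
--                 if nxt.strip().startswith("```"):
--                     break
--             continue
--         if stripped.startswith("#"):
--             if current_block:
--                 blocks.append("\n".join(current_block).strip())
--                 current_block = []
--             blocks.append(stripped)
--             i += 1
--             continue
--         if stripped == "":
--             if current_block:
--                 blocks.append("\n".join(current_block).strip())
--                 current_block = []
--         else: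
--             current_block.append(line)
--         i += 1
--     if current_block:
--         blocks.append("\n".join(current_block).strip())
--     return [b for b in blocks if b]
-- ===== Notes on version B (the rewrite author's own statement) =====
-- stated objective: alternative
-- what changed: The in_code_block flag threaded through A's single for-loop is removed: B scans with an explicit index and, on an opening fence, a dedicated inner loop consumes the entire code block (through its closing fence or to EOF) before the outer loop resumes.
import Mathlib
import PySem

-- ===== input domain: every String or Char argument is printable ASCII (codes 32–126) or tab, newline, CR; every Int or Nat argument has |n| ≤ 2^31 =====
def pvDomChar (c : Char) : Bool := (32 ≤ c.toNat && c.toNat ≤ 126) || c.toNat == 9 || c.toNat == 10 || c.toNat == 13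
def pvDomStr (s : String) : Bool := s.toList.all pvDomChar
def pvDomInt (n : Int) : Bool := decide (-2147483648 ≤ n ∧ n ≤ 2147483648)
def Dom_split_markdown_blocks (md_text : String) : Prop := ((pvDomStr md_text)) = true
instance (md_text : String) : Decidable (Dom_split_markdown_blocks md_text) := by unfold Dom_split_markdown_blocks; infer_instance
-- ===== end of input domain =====

-- B replaces A's in_code_block flag by an index-style scan with an inner loop that
-- consumes a whole fenced code block at once (objective: alternative decomposition).

-- shared line predicates and the 'flush current_block' step, exactly as both Pythons compute them
def pvFence (l : String) : Bool := PySem.Str.startswith (PySem.Str.strip l) "```"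
def pvHash (l : String) : Bool := PySem.Str.startswith (PySem.Str.strip l) "#"
def pvBlank (l : String) : Bool := PySem.Str.strip l == ""
def pvFlush (blocks cur : List String) : List String :=
  if cur.isEmpty then blocks else blocks ++ [PySem.Str.strip (PySem.Str.join "\n" cur)]

-- ===== PORT A =====
-- A's for-loop, state (blocks, current_block, in_code_block), branch order preserved
def goA : List String → List String → List String → Bool → List String
  | [], blocks, cur, _ => pvFlush blocks cur
  | l :: ls, blocks, cur, inCode =>
    if pvFence l then goA ls blocks (cur ++ [l]) (!inCode)
    else if inCode then goA ls blocks (cur ++ [l]) inCode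
    else if pvHash l then goA ls (pvFlush blocks cur ++ [PySem.Str.strip l]) [] inCode
    else if pvBlank l then goA ls (pvFlush blocks cur) [] inCode
    else goA ls blocks (cur ++ [l]) inCode

def split_markdown_blocks (md_text : String) : List String :=
  (goA (PySem.Str.splitlines md_text) [] [] false).filter (fun b => !(b == ""))

-- ===== PORT B =====
-- B's inner while-loop: append lines until (and including) a closing fence, or to EOF
def pvConsume : List String → List String → List String × List String
  | [], cur => (cur, [])
  | l :: ls, cur => if pvFence l then (cur ++ [l], ls) else pvConsume ls (cur ++ [l])

theorem pvConsume_len : ∀ (ls cur : List String), (pvConsume ls cur).2.length ≤ ls.length := by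
  intro ls
  induction ls with
  | nil => intro cur; simp [pvConsume]
  | cons l ls ih =>
    intro cur
    by_cases h : pvFence l = true
    · simp [pvConsume, h]
    · simp only [pvConsume, h, if_neg, Bool.not_eq_true] at *
      exact Nat.le_trans (ih (cur ++ [l])) (Nat.le_succ _)

-- B's outer while-loop over the remaining lines, state (blocks, current_block)
def goB : List String → List String → List String → List String
  | [], blocks, cur => pvFlush blocks cur
  | l :: ls, blocks, cur =>
    if pvFence l then
      goB (pvConsume ls (cur ++ [l])).2 blocks (pvConsume ls (cur ++ [l])).1
    else if pvHash l then goB ls (pvFlush blocks cur ++ [PySem.Str.strip l]) []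
    else if pvBlank l then goB ls (pvFlush blocks cur) []
    else goB ls blocks (cur ++ [l])
termination_by ls _ _ => ls.length
decreasing_by
  · exact Nat.lt_succ_of_le (pvConsume_len ls (cur ++ [l]))
  all_goals simp

def split_markdown_blocks_alt (md_text : String) : List String :=
  (goB (PySem.Str.splitlines md_text) [] []).filter (fun b => !(b == ""))

-- ===== PRECONDITION & SPEC =====
def Spec_split_markdown_blocks (md_text : String) (out : List String) : Prop := out = split_markdown_blocks_alt md_text
instance (md_text : String) (out : List String) : Decidable (Spec_split_markdown_blocks md_text out) := by unfold Spec_split_markdown_blocks; infer_instance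

-- ===== CLAIM (what is proved, stated in full; the proofs are below) =====
def Claim_equal_split_markdown_blocks : Prop := ∀ (md_text : String), Dom_split_markdown_blocks md_text → Spec_split_markdown_blocks md_text (split_markdown_blocks md_text)

-- ===== LEMMAS AND PROOFS =====

-- while in a code block, A appends every line until (and including) a fence and clears the flag
theorem goA_code : ∀ (ls blocks cur : List String),
    goA ls blocks cur true = goA (pvConsume ls cur).2 blocks (pvConsume ls cur).1 false := by
  intro ls
  induction ls with
  | nil => intro blocks cur; simp [pvConsume, goA]
  | cons l ls ih =>
    intro blocks cur
    by_cases h : pvFence l = true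
    · simp [goA, pvConsume, h]
    · simp [goA, pvConsume, h, ih]

theorem goA_eq_goB : ∀ (n : Nat) (ls : List String), ls.length ≤ n →
    ∀ (blocks cur : List String), goA ls blocks cur false = goB ls blocks cur := by
  intro n
  induction n with
  | zero =>
    intro ls hls blocks cur
    have : ls = [] := List.length_eq_zero_iff.mp (Nat.le_zero.mp hls)
    subst this; simp [goA, goB]
  | succ n ih =>
    intro ls hls blocks cur
    match ls with
    | [] => simp [goA, goB]
    | l :: ls =>
      have hl : ls.length ≤ n := Nat.succ_le_succ_iff.mp hls
      by_cases hf : pvFence l = true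
      · rw [goA, goB]
        simp only [hf, if_true, Bool.not_false]
        rw [goA_code]
        exact ih _ (Nat.le_trans (pvConsume_len ls (cur ++ [l])) hl) _ _
      · rw [goA, goB]
        simp only [hf, Bool.false_eq_true, if_false]
        by_cases hh : pvHash l = true
        · simp only [hh, if_true]; exact ih _ hl _ _
        · simp only [hh, Bool.false_eq_true, if_false]
          by_cases hb : pvBlank l = true
          · simp only [hb, if_true]; exact ih _ hl _ _
          · simp only [hb, Bool.false_eq_true, if_false]; exact ih _ hl _ _

-- ===== VERDICT (by name: the statement is the Claim_ definition above) =====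
theorem split_markdown_blocks_spec : Claim_equal_split_markdown_blocks := by
  intro md_text _
  unfold Spec_split_markdown_blocks split_markdown_blocks split_markdown_blocks_alt
  rw [goA_eq_goB (PySem.Str.splitlines md_text).length _ (Nat.le_refl _)]
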